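-- pv_equiv track=rewrite | github.com/faulknerpearce/advent_of_code | 2024/day_4/part_1.py | search_horizontal
-- ===== SOURCE A (Python) =====
-- def check_string(string):
--     '''Checks if a string ( or it's reverse ) matches the target word.'''
--     word = 'XMAS'
--
--     return string == word or string[::-1] == word
--
-- def search_horizontal(arrays):
--     '''Searches for occurrences of the word horizontally in the array.'''
--     count = 0
--
--     for array in arrays:
--         for i in range(len(array) -3):
--             word = array[i:i+4]
--
--             if check_string(word):
--                 count += 1
--
--     return count
-- ===== SOURCE B (Python) =====
-- def search_horizontal(arrays):
--     '''Searches for occurrences of the word horizontally in the array.'''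
--     total = 0
--     for row in arrays:
--         total += row.count("XMAS") + row.count("SAMX")
--     return total
-- ===== Notes on version B (the rewrite author's own statement) =====
-- stated objective: simpler
-- what changed: Replaces the explicit window loop (slice every length-4 window and compare it or its reverse to 'XMAS') with per-row built-in substring counts row.count('XMAS') + row.count('SAMX'); this is exact because neither pattern can overlap itself, so the non-overlapping scan counts every window.
import Mathlib
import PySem

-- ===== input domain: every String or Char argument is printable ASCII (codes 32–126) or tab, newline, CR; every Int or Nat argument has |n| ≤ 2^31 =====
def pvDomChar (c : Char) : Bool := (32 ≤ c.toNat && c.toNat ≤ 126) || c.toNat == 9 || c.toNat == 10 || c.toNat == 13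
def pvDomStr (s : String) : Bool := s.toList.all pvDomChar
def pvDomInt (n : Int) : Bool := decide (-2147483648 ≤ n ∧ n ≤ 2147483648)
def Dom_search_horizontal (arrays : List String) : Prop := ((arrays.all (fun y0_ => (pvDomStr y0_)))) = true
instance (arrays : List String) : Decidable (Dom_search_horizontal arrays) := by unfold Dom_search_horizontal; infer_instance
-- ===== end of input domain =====

-- B replaces A's explicit length-4 window loop with per-row built-in substring counts
-- (row.count("XMAS") + row.count("SAMX")); exact because neither pattern self-overlaps. Objective: simpler.

-- ===== PORT A =====
def check_string (string : String) : Bool :=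
  let word := "XMAS"
  -- string[::-1] is an always-defined slice (step -1 ≠ 0), so .getD "" is never taken
  string == word || ((PySem.Str.slice? string none none (-1)).getD "") == word

def search_horizontal (arrays : List String) : Int :=
  arrays.foldl (fun count array =>
    (PySem.List.pyRange 0 (PySem.Str.len array - 3) 1).foldl
      (fun count i =>
        let word := PySem.Str.slice array (some i) (some (i + 4))
        if check_string word then count + 1 else count)
      count) 0

-- ===== PORT B =====
def search_horizontal_alt (arrays : List String) : Int :=
  arrays.foldl
    (fun total row =>
      total + (PySem.Str.count row "XMAS" : Int) + (PySem.Str.count row "SAMX" : Int)) 0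

-- ===== PRECONDITION & SPEC =====
def Spec_search_horizontal (arrays : List String) (out : Int) : Prop := out = search_horizontal_alt arrays
instance (arrays : List String) (out : Int) : Decidable (Spec_search_horizontal arrays out) := by unfold Spec_search_horizontal; infer_instance

-- ===== CLAIM (what is proved, stated in full; the proofs are below) =====
def Claim_equal_search_horizontal : Prop := ∀ (arrays : List String), Dom_search_horizontal arrays → Spec_search_horizontal arrays (search_horizontal arrays)

-- ===== LEMMAS AND PROOFS =====

-- number of positions of cl at which p occurs (all windows, overlapping allowed)
def pvOcc (p : List Char) : List Char → Nat
  | [] => 0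
  | c :: t => (if p.isPrefixOf (c :: t) then 1 else 0) + pvOcc p t

theorem pvOcc_eq_countP (p : List Char) (cl : List Char) :
    pvOcc p cl = (List.range cl.length).countP (fun j => p.isPrefixOf (cl.drop j)) := by
  induction cl with
  | nil => simp [pvOcc]
  | cons c t ih =>
      simp [pvOcc, List.range_succ_eq_map, List.countP_cons, List.countP_map, ih,
        Function.comp_def, Nat.add_comm]

theorem pvCountP_or_disjoint (l : List ℕ) (a b : ℕ → Bool)
    (h : ∀ j ∈ l, ¬(a j = true ∧ b j = true)) :
    l.countP (fun j => a j || b j) = l.countP a + l.countP b := by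
  induction l with
  | nil => simp
  | cons x t ih =>
      have hx := h x (by simp)
      have ht : ∀ j ∈ t, ¬(a j = true ∧ b j = true) := fun j hj => h j (by simp [hj])
      simp only [List.countP_cons, ih ht]
      cases ha : a x <;> cases hb : b x <;> simp_all <;> omega

theorem pvCountP_range_trunc (P : ℕ → Bool) (n m : ℕ) (hm : m ≤ n)
    (h : ∀ j, m ≤ j → P j = false) :
    (List.range n).countP P = (List.range m).countP P := by
  have : n = m + (n - m) := by omega
  rw [this, List.range_add, List.countP_append]
  have : ((List.range (n - m)).map (m + ·)).countP P = 0 := by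
    rw [List.countP_eq_zero]
    intro j hj
    simp only [List.mem_map] at hj
    obtain ⟨k, _, rfl⟩ := hj
    simp [h _ (Nat.le_add_right m k)]
  omega

-- go with enough fuel computes pvOcc, for patterns whose occurrences never overlap
theorem pvGo_eq (p : List Char) (hp : p ≠ [])
    (hstep : ∀ s : List Char, p.isPrefixOf s = true →
      pvOcc p s = pvOcc p (s.drop p.length) + 1) :
    ∀ (fuel : ℕ) (s : List Char) (acc : ℕ), s.length ≤ fuel →
      PySem.Chars.count.go p fuel s acc = acc + pvOcc p s := by
  intro fuel
  induction fuel with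
  | zero =>
      intro s acc hs
      have : s = [] := by cases s <;> simp_all
      subst this
      rw [PySem.Chars.count.go.eq_def]
      simp [pvOcc]
  | succ f ih =>
      intro s acc hs
      rw [PySem.Chars.count.go.eq_def]
      cases s with
      | nil => simp [pvOcc]
      | cons c t =>
          by_cases hpre : p.isPrefixOf (c :: t) = true
          · simp only [hpre, if_true]
            have hlen : (List.drop p.length (c :: t)).length ≤ f := by
              have : 0 < p.length := by cases p <;> simp_all
              simp only [List.length_drop, List.length_cons] at *
              omega
            rw [ih _ _ hlen, hstep _ hpre]
            omega
          · have hpre' : p.isPrefixOf (c :: t) = false := by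
              cases hh : p.isPrefixOf (c :: t)
              · rfl
              · exact absurd hh hpre
            simp only [hpre', Bool.false_eq_true, if_false]
            have hlen : t.length ≤ f := by simp at hs; omega
            rw [ih _ _ hlen]
            simp [pvOcc, hpre']

theorem pvCount_eq_occ (p : List Char) (hp : p ≠ [])
    (hstep : ∀ s : List Char, p.isPrefixOf s = true →
      pvOcc p s = pvOcc p (s.drop p.length) + 1) (s : List Char) :
    PySem.Chars.count s p = pvOcc p s := by
  unfold PySem.Chars.count
  have : p.isEmpty = false := by cases p <;> simp_all
  rw [this]
  simp only [Bool.false_eq_true, if_false]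
  rw [pvGo_eq p hp hstep s.length s 0 le_rfl]
  omega

-- no occurrence of XMAS can start within 3 positions of another
theorem pvStepX : ∀ s : List Char, ("XMAS".toList).isPrefixOf s = true →
    pvOcc "XMAS".toList s = pvOcc "XMAS".toList (s.drop ("XMAS".toList).length) + 1 := by
  intro s h
  rw [List.isPrefixOf_iff_prefix] at h
  obtain ⟨r, rfl⟩ := h
  show pvOcc _ ('X' :: 'M' :: 'A' :: 'S' :: r) = _
  simp [pvOcc, List.isPrefixOf]
  omega

theorem pvStepS : ∀ s : List Char, ("SAMX".toList).isPrefixOf s = true →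
    pvOcc "SAMX".toList s = pvOcc "SAMX".toList (s.drop ("SAMX".toList).length) + 1 := by
  intro s h
  rw [List.isPrefixOf_iff_prefix] at h
  obtain ⟨r, rfl⟩ := h
  show pvOcc _ ('S' :: 'A' :: 'M' :: 'X' :: r) = _
  simp [pvOcc, List.isPrefixOf]
  omega

-- check_string of the window at j, as prefix tests on the char list
theorem pvCheck_window (s : String) (j : ℕ) :
    check_string (PySem.Str.slice s (some (j : Int)) (some ((j : Int) + 4))) =
      (("XMAS".toList).isPrefixOf (s.toList.drop j) || ("SAMX".toList).isPrefixOf (s.toList.drop j)) := by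
  have hw : (PySem.Str.slice s (some (j : Int)) (some ((j : Int) + 4))).toList
      = (s.toList.drop j).take 4 := by
    rw [PySem.Str.toList_slice, PySem.Chars.slice_eq_listSlice]
    rw [show ((j : Int) + 4) = ((j : Int) + ((4 : ℕ) : Int)) by norm_num]
    rw [PySem.List.slice_natCast_add]
  set w := PySem.Str.slice s (some (j : Int)) (some ((j : Int) + 4)) with hwdef
  have key : ∀ (p : List Char), p.length = 4 →
      (w.toList = p ↔ p.isPrefixOf (s.toList.drop j) = true) := by
    intro p hp4
    rw [List.isPrefixOf_iff_prefix, List.prefix_iff_eq_take, hw, hp4]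
    exact eq_comm
  unfold check_string
  rw [PySem.Str.slice?_none_none_neg_one]
  simp only [Option.getD_some]
  have h1 : (w == "XMAS") = ("XMAS".toList).isPrefixOf (s.toList.drop j) := by
    rw [Bool.eq_iff_iff, beq_iff_eq, ← String.toList_inj]
    exact key _ (by decide)
  have h2 : (String.ofList w.toList.reverse == "XMAS")
      = ("SAMX".toList).isPrefixOf (s.toList.drop j) := by
    rw [Bool.eq_iff_iff, beq_iff_eq, ← String.toList_inj]
    have h3 : ("XMAS".toList).reverse = "SAMX".toList := by decide
    rw [String.toList_ofList, List.reverse_eq_iff, h3]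
    exact key _ (by decide)
  rw [h1, h2]

-- occurrences can't start in the last 3 positions (pattern length 4)
theorem pvNoTail (p : List Char) (hp : p.length = 4) (cl : List Char) :
    ∀ j, cl.length - 3 ≤ j → p.isPrefixOf (cl.drop j) = false := by
  intro j hj
  by_contra h
  rw [Bool.not_eq_false, List.isPrefixOf_iff_prefix] at h
  have := h.length_le
  simp only [List.length_drop, hp] at this
  omega

-- the two patterns never match the same position
theorem pvDisjoint (cl : List Char) : ∀ j,
    ¬(("XMAS".toList).isPrefixOf (cl.drop j) = true ∧ ("SAMX".toList).isPrefixOf (cl.drop j) = true) := by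
  intro j ⟨h1, h2⟩
  rw [List.isPrefixOf_iff_prefix] at h1 h2
  obtain ⟨r1, hr1⟩ := h1
  obtain ⟨r2, hr2⟩ := h2
  rw [← hr2] at hr1
  simp at hr1

-- the per-row agreement: A's inner fold from c equals c + the two counts
theorem pvRow_eq (c : Int) (s : String) :
    (PySem.List.pyRange 0 (PySem.Str.len s - 3) 1).foldl
      (fun count i =>
        let word := PySem.Str.slice s (some i) (some (i + 4))
        if check_string word then count + 1 else count) c
    = c + (PySem.Str.count s "XMAS" : Int) + (PySem.Str.count s "SAMX" : Int) := by
  rw [PySem.List.pyRange_one, List.foldl_map]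
  simp only [zero_add, Int.sub_zero]
  rw [PySem.List.foldl_if_add_one
    (fun k : ℕ => check_string (PySem.Str.slice s (some (k : Int)) (some ((k : Int) + 4))))]
  have hm : ((PySem.Str.len s : Int) - 3).toNat = s.toList.length - 3 := by
    simp
    omega
  rw [hm]
  have hcongr : (List.range (s.toList.length - 3)).countP
      (fun k : ℕ => check_string (PySem.Str.slice s (some (k : Int)) (some ((k : Int) + 4))))
      = (List.range (s.toList.length - 3)).countP
        (fun j => ("XMAS".toList).isPrefixOf (s.toList.drop j) || ("SAMX".toList).isPrefixOf (s.toList.drop j)) := by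
    apply List.countP_congr
    intro j _
    rw [pvCheck_window s j]
  rw [hcongr,
    ← pvCountP_range_trunc _ s.toList.length (s.toList.length - 3) (by omega)
      (fun j hj => by
        rw [pvNoTail "XMAS".toList (by decide) s.toList j hj,
          pvNoTail "SAMX".toList (by decide) s.toList j hj]
        rfl),
    pvCountP_or_disjoint _ _ _ (fun j _ => pvDisjoint s.toList j),
    ← pvOcc_eq_countP, ← pvOcc_eq_countP,
    ← pvCount_eq_occ _ (by decide) pvStepX, ← pvCount_eq_occ _ (by decide) pvStepS]
  rw [PySem.Str.count_eq, PySem.Str.count_eq]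
  push_cast
  ring

-- ===== VERDICT (by name: the statement is the Claim_ definition above) =====
theorem search_horizontal_spec : Claim_equal_search_horizontal := by
  intro arrays _
  unfold Spec_search_horizontal search_horizontal search_horizontal_alt
  congr 1
  funext c s
  exact pvRow_eq c s
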